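-- pv_equiv track=rewrite | github.com/pypi-data/pypi-mirror-374 | packages/obsidianmd-parser/obsidianmd_parser-0.3.1.tar.gz/obsidianmd_parser-0.3.1/src/obsidian_parser/parser/elements.py | mask_code_blocks
-- ===== SOURCE A (Python) =====
-- def mask_code_blocks(content: str, mask_char: str = "\x00") -> str:
--     """Replace code block content with mask characters.
--
--     This preserves line numbers while preventing parsing of code content.
--
--     Args:
--         content: The note content
--         mask_char: Character to use for masking (should not appear in patterns)
--
--     Returns:
--         Content with code blocks masked
--     """
--     lines = content.split("\n")
--     result = []
--     in_code_block = False
--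
--     for line in lines:
--         if line.strip().startswith("```"):
--             in_code_block = not in_code_block
--             result.append(mask_char * len(line))
--         elif in_code_block:
--             result.append(mask_char * len(line))
--         else:
--             result.append(line)
--
--     return "\n".join(result)
-- ===== SOURCE B (Python) =====
-- def mask_code_blocks(content: str, mask_char: str = "\x00") -> str:
--     """Mask code blocks via a precomputed fence table and prefix fence counts."""
--     lines = content.split("\n")
--     fences = [ln.strip().startswith("```") for ln in lines]
--     before = [sum(fences[:i]) for i in range(len(lines))]
--     masked = [mask_char * len(ln) if fe or bf % 2 else ln
--               for ln, fe, bf in zip(lines, fences, before)]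
--     return "\n".join(masked)
-- ===== Notes on version B (the rewrite author's own statement) =====
-- stated objective: alternative
-- what changed: Replaced A's single pass with a toggled boolean flag by a table-driven formulation: precompute per-line fence flags and prefix fence counts, then mask each line independently by the parity of fences seen before it.
import Mathlib
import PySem

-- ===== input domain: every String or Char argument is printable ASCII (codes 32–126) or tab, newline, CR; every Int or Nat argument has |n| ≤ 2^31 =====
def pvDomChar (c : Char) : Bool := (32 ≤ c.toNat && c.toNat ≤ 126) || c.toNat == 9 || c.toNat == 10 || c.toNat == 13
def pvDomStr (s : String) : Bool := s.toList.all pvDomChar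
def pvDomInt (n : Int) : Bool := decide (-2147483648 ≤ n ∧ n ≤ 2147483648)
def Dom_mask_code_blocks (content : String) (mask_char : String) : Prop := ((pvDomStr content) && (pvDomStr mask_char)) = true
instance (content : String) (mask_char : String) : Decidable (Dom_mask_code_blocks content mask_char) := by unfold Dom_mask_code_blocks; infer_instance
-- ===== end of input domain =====

-- B replaces A's single pass with a toggled in-code-block flag by a table-driven
-- formulation (per-line fence flags + prefix fence counts, mask by parity); same result.

-- mask_char * len(line)
def pvMask (mask_char : String) (line : String) : String :=
  String.ofList (PySem.List.pyRepeat mask_char.toList (PySem.Str.len line))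

-- line.strip().startswith("```")
def pvIsFence (line : String) : Bool :=
  PySem.Str.startswith (PySem.Str.strip line) "```"

-- ===== PORT A =====
def mask_code_blocks (content : String) (mask_char : String) : String :=
  let lines := (PySem.Str.split? content "\n").getD []   -- sep "\n" ≠ "", so split? is 'some'
  let r := lines.foldl (fun (st : List String × Bool) line =>
    if pvIsFence line then (st.1 ++ [pvMask mask_char line], !st.2)
    else if st.2 then (st.1 ++ [pvMask mask_char line], st.2)
    else (st.1 ++ [line], st.2)) ([], false)
  PySem.Str.join "\n" r.1

-- ===== PORT B =====
def mask_code_blocks_alt (content : String) (mask_char : String) : String :=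
  let lines := (PySem.Str.split? content "\n").getD []   -- sep "\n" ≠ "", so split? is 'some'
  let fences := lines.map pvIsFence
  let before := (List.range lines.length).map (fun i => (fences.take i).count true)
  let masked := (lines.zip (fences.zip before)).map (fun p =>
    if p.2.1 || p.2.2 % 2 == 1 then pvMask mask_char p.1 else p.1)
  PySem.Str.join "\n" masked

-- ===== PRECONDITION & SPEC =====
def Spec_mask_code_blocks (content : String) (mask_char : String) (out : String) : Prop := out = mask_code_blocks_alt content mask_char
instance (content : String) (mask_char : String) (out : String) : Decidable (Spec_mask_code_blocks content mask_char out) := by unfold Spec_mask_code_blocks; infer_instance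

-- ===== CLAIM (what is proved, stated in full; the proofs are below) =====
def Claim_equal_mask_code_blocks : Prop := ∀ (content : String) (mask_char : String), Dom_mask_code_blocks content mask_char → Spec_mask_code_blocks content mask_char (mask_code_blocks content mask_char)

-- ===== LEMMAS AND PROOFS =====

-- the per-line output of A's loop, with b the entering in-code-block flag
def pvG (mc : String) (b : Bool) : List String → List String
  | [] => []
  | ln :: ls =>
    if pvIsFence ln then pvMask mc ln :: pvG mc (!b) ls
    else if b then pvMask mc ln :: pvG mc b ls
    else ln :: pvG mc b ls

theorem pvA_fold (mc : String) (ls : List String) (acc : List String) (b : Bool) :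
    (ls.foldl (fun (st : List String × Bool) line =>
      if pvIsFence line then (st.1 ++ [pvMask mc line], !st.2)
      else if st.2 then (st.1 ++ [pvMask mc line], st.2)
      else (st.1 ++ [line], st.2)) (acc, b)).1 = acc ++ pvG mc b ls := by
  induction ls generalizing acc b with
  | nil => simp [pvG]
  | cons ln ls ih =>
    by_cases h : pvIsFence ln = true <;> by_cases hb : b = true <;>
      simp [pvG, h, hb, ih, List.append_assoc]

theorem pvB_table (mc : String) (ls : List String) (c : Nat) :
    (ls.zip ((ls.map pvIsFence).zip
        ((List.range ls.length).map (fun i => c + ((ls.map pvIsFence).take i).count true)))).map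
      (fun p => if p.2.1 || (p.2.2 % 2 == 1) then pvMask mc p.1 else p.1)
    = pvG mc (decide (c % 2 = 1)) ls := by
  induction ls generalizing c with
  | nil => simp [pvG]
  | cons ln ls ih =>
    rw [List.length_cons, List.range_succ_eq_map]
    by_cases h : pvIsFence ln = true
    · simp only [List.map_cons, h, List.zip_cons_cons, List.take_zero, List.count_nil,
        Nat.add_zero, List.map_map, Function.comp_def, List.take_succ_cons, List.count_cons,
        beq_self_eq_true, if_pos, Bool.true_or]
      have hfun : (fun i => c + (List.count true (List.take i (List.map pvIsFence ls)) + 1))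
          = (fun i => (c + 1) + List.count true (List.take i (List.map pvIsFence ls))) := by
        funext i; omega
      rw [hfun, ih (c + 1)]
      have h0 : pvG mc (decide (c % 2 = 1)) (ln :: ls) = pvMask mc ln :: pvG mc (!decide (c % 2 = 1)) ls := by
        simp [pvG, h]
      rw [h0]
      have hpar : decide ((c + 1) % 2 = 1) = !decide (c % 2 = 1) := by
        rcases Nat.mod_two_eq_zero_or_one c with hc | hc <;> simp [Nat.add_mod, hc]
      rw [hpar]
    · simp only [Bool.not_eq_true] at h
      simp only [List.map_cons, h, List.zip_cons_cons, List.take_zero, List.count_nil,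
        Nat.add_zero, List.map_map, Function.comp_def, List.take_succ_cons, List.count_cons,
        Bool.false_or]
      have hfun : (fun i => c + (List.count true (List.take i (List.map pvIsFence ls)) + if (false == true) = true then 1 else 0))
          = (fun i => c + List.count true (List.take i (List.map pvIsFence ls))) := by
        funext i; simp
      rw [hfun, ih c]
      have h0 : pvG mc (decide (c % 2 = 1)) (ln :: ls)
          = if decide (c % 2 = 1) then pvMask mc ln :: pvG mc (decide (c % 2 = 1)) ls
            else ln :: pvG mc (decide (c % 2 = 1)) ls := by
        simp [pvG, h]
      rw [h0]
      by_cases hc : c % 2 = 1 <;> simp [hc]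

-- ===== VERDICT (by name: the statement is the Claim_ definition above) =====
theorem mask_code_blocks_spec : Claim_equal_mask_code_blocks := by
  intro content mask_char _
  unfold Spec_mask_code_blocks mask_code_blocks mask_code_blocks_alt
  dsimp only
  rw [pvA_fold]
  have h := pvB_table mask_char ((PySem.Str.split? content "\n").getD []) 0
  simp only [Nat.zero_add] at h
  rw [h]
  simp
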